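-- pv_equiv track=rewrite | github.com/Miguel-SLF/Atividade-Grafos | Atividade3_Grafos.py | percurso_possivel
-- ===== SOURCE A (Python) =====
-- from collections import deque
--
-- def listar_vizinhos(vertices, arestas, vertice):
--     if vertice not in vertices:
--         return []
--
--     vizinhos = set()
--     for u, v in arestas:
--         if u == vertice:
--             vizinhos.add(v)
--         elif v == vertice:
--             vizinhos.add(u)
--
--     return list(vizinhos)
--
-- def percurso_possivel(vertices, arestas, inicio, fim):
--     if inicio not in vertices or fim not in vertices:
--         return False
--     if inicio == fim:
--         return True
--
--     visitados = {inicio}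
--     fila = deque([inicio])
--
--     while fila:
--         atual = fila.popleft()
--
--         for vizinho in listar_vizinhos(vertices, arestas, atual):
--             if vizinho == fim:
--                 return True
--             if vizinho not in visitados:
--                 visitados.add(vizinho)
--                 fila.append(vizinho)
--
--     return False
-- ===== SOURCE B (Python) =====
-- def percurso_possivel(vertices, arestas, inicio, fim):
--     vset = set(vertices)
--     if inicio not in vset or fim not in vset:
--         return False
--     alcancados = {inicio}
--     mudou = True
--     while mudou:
--         mudou = False
--         for u, v in arestas:
--             if u in alcancados and u in vset and v not in alcancados:
--                 alcancados.add(v)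
--                 mudou = True
--             if v in alcancados and v in vset and u not in alcancados:
--                 alcancados.add(u)
--                 mudou = True
--     return fim in alcancados
-- ===== Notes on version B (the rewrite author's own statement) =====
-- stated objective: alternative
-- what changed: Replaced the queue-based BFS that rebuilds a neighbour set of every dequeued vertex by a Bellman-Ford-style saturation: repeatedly relax every edge against a reachable-set until a whole pass adds nothing, with membership tests on a prebuilt set of vertices.
import Mathlib
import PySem

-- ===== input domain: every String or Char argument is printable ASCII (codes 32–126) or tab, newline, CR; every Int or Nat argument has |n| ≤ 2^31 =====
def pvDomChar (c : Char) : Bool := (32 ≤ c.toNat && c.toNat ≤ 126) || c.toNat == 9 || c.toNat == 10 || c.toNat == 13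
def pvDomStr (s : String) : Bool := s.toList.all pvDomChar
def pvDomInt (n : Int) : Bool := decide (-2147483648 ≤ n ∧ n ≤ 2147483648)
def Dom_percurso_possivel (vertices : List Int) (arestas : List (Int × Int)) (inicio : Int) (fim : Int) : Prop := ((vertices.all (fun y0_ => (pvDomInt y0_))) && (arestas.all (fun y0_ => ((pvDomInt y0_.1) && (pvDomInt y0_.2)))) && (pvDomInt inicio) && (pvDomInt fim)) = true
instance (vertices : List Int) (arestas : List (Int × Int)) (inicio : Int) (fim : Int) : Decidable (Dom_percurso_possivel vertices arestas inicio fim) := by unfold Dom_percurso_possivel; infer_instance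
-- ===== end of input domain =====

-- A = queue BFS that recomputes each dequeued vertex's neighbour set from the edge list; B = edge-relaxation
-- saturation (relax every edge per round until a round adds nothing), objective: alternative algorithm.
-- The Bool result is independent of Python's set-iteration order, so listar_vizinhos is ported in insertion order.

-- ===== PORT A =====
-- every value a traversal can ever visit: inicio and the edge endpoints (used only to size the loop fuel)
def pvEndpoints (arestas : List (Int × Int)) : List Int :=
  arestas.flatMap (fun e => [e.1, e.2])

def listar_vizinhos (vertices : List Int) (arestas : List (Int × Int)) (vertice : Int) : List Int :=
  if vertice ∉ vertices then []
  else
    arestas.foldl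
      (fun viz e =>
        if e.1 = vertice then PySem.Set.add viz e.2
        else if e.2 = vertice then PySem.Set.add viz e.1
        else viz)
      PySem.Set.empty

-- the inner 'for vizinho in listar_vizinhos(...)' loop: none = early 'return True'
def pvVisita (fim : Int) : List Int → PySem.Set Int → List Int → Option (PySem.Set Int × List Int)
  | [], vis, fila => some (vis, fila)
  | n :: ns, vis, fila =>
    if n = fim then none
    else if n ∈ vis then pvVisita fim ns vis fila
    else pvVisita fim ns (PySem.Set.add vis n) (fila ++ [n])

-- the 'while fila:' loop; the fuel is an upper bound proved never to run out (pvBFS_spec)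
def pvBFS (vertices : List Int) (arestas : List (Int × Int)) (fim : Int) :
    Nat → PySem.Set Int → List Int → Bool
  | 0, _, _ => false
  | fuel + 1, vis, fila =>
    match fila with
    | [] => false
    | atual :: rest =>
      match pvVisita fim (listar_vizinhos vertices arestas atual) vis rest with
      | none => true
      | some (vis', fila') => pvBFS vertices arestas fim fuel vis' fila'

def percurso_possivel (vertices : List Int) (arestas : List (Int × Int)) (inicio : Int) (fim : Int) : Bool :=
  if inicio ∉ vertices ∨ fim ∉ vertices then false
  else if inicio = fim then true
  else
    pvBFS vertices arestas fim (2 * (inicio :: pvEndpoints arestas).length + 2)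
      (PySem.Set.add PySem.Set.empty inicio) [inicio]

-- ===== PORT B =====
-- one edge of Source B's inner 'for u, v in arestas' loop on the state (alcancados, mudou)
def pvRelax (vset : PySem.Set Int) (st : PySem.Set Int × Bool) (e : Int × Int) :
    PySem.Set Int × Bool :=
  let st1 := if e.1 ∈ st.1 ∧ e.1 ∈ vset ∧ e.2 ∉ st.1 then (PySem.Set.add st.1 e.2, true) else st
  if e.2 ∈ st1.1 ∧ e.2 ∈ vset ∧ e.1 ∉ st1.1 then (PySem.Set.add st1.1 e.1, true) else st1

-- Source B's 'while mudou:' loop; the fuel is an upper bound proved never to run out (pvSatura_spec)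
def pvSatura (arestas : List (Int × Int)) (vset : PySem.Set Int) :
    Nat → PySem.Set Int → PySem.Set Int
  | 0, alc => alc
  | fuel + 1, alc =>
    let st := arestas.foldl (pvRelax vset) (alc, false)
    if st.2 then pvSatura arestas vset fuel st.1 else st.1

def percurso_possivel_alt (vertices : List Int) (arestas : List (Int × Int)) (inicio : Int) (fim : Int) : Bool :=
  let vset := PySem.Set.ofList vertices
  if inicio ∉ vset ∨ fim ∉ vset then false
  else
    decide (fim ∈ pvSatura arestas vset ((inicio :: pvEndpoints arestas).length + 1)
      (PySem.Set.add PySem.Set.empty inicio))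

-- ===== PRECONDITION & SPEC =====
def Spec_percurso_possivel (vertices : List Int) (arestas : List (Int × Int)) (inicio : Int) (fim : Int) (out : Bool) : Prop := out = percurso_possivel_alt vertices arestas inicio fim
instance (vertices : List Int) (arestas : List (Int × Int)) (inicio : Int) (fim : Int) (out : Bool) : Decidable (Spec_percurso_possivel vertices arestas inicio fim out) := by unfold Spec_percurso_possivel; infer_instance

-- ===== CLAIM (what is proved, stated in full; the proofs are below) =====
def Claim_equal_percurso_possivel : Prop := ∀ (vertices : List Int) (arestas : List (Int × Int)) (inicio : Int) (fim : Int), Dom_percurso_possivel vertices arestas inicio fim → Spec_percurso_possivel vertices arestas inicio fim (percurso_possivel vertices arestas inicio fim)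

-- ===== LEMMAS AND PROOFS =====

-- one undirected traversal step: the source must be a listed vertex
def pvStep (vertices : List Int) (arestas : List (Int × Int)) (a b : Int) : Prop :=
  a ∈ vertices ∧ ((a, b) ∈ arestas ∨ (b, a) ∈ arestas)

def pvReach (vertices : List Int) (arestas : List (Int × Int)) : Int → Int → Prop :=
  Relation.ReflTransGen (pvStep vertices arestas)

theorem pvStep_snd_mem_endpoints {vertices : List Int} {arestas : List (Int × Int)} {a b : Int}
    (h : pvStep vertices arestas a b) : b ∈ pvEndpoints arestas := by
  rcases h.2 with h' | h' <;> exact List.mem_flatMap.2 ⟨_, h', by simp⟩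

theorem mem_listar_vizinhos {vertices : List Int} {arestas : List (Int × Int)} {x y : Int} :
    y ∈ listar_vizinhos vertices arestas x ↔ pvStep vertices arestas x y := by
  unfold listar_vizinhos pvStep
  by_cases hx : x ∈ vertices
  · rw [if_neg (by simp [hx])]
    have key : ∀ (l : List (Int × Int)) (s : PySem.Set Int),
        y ∈ l.foldl (fun viz e =>
          if e.1 = x then PySem.Set.add viz e.2
          else if e.2 = x then PySem.Set.add viz e.1
          else viz) s ↔ y ∈ s ∨ ∃ e ∈ l, (e.1 = x ∧ y = e.2) ∨ (¬ e.1 = x ∧ e.2 = x ∧ y = e.1) := by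
      intro l
      induction l with
      | nil => simp
      | cons e l ih =>
        intro s
        simp only [List.foldl_cons, List.mem_cons]
        by_cases h1 : e.1 = x
        · rw [if_pos h1, ih]
          simp only [PySem.Set.mem_add]
          constructor
          · rintro ((h | h) | ⟨e', he', h⟩)
            · exact Or.inl h
            · exact Or.inr ⟨e, Or.inl rfl, Or.inl ⟨h1, h⟩⟩
            · exact Or.inr ⟨e', Or.inr he', h⟩
          · rintro (h | ⟨e', (rfl | he'), h⟩)
            · exact Or.inl (Or.inl h)
            · rcases h with ⟨_, h⟩ | ⟨h, _, _⟩
              · exact Or.inl (Or.inr h)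
              · exact absurd h1 h
            · exact Or.inr ⟨e', he', h⟩
        · by_cases h2 : e.2 = x
          · rw [if_neg h1, if_pos h2, ih]
            simp only [PySem.Set.mem_add]
            constructor
            · rintro ((h | h) | ⟨e', he', h⟩)
              · exact Or.inl h
              · exact Or.inr ⟨e, Or.inl rfl, Or.inr ⟨h1, h2, h⟩⟩
              · exact Or.inr ⟨e', Or.inr he', h⟩
            · rintro (h | ⟨e', (rfl | he'), h⟩)
              · exact Or.inl (Or.inl h)
              · rcases h with ⟨h, _⟩ | ⟨_, _, h⟩
                · exact absurd h h1
                · exact Or.inl (Or.inr h)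
              · exact Or.inr ⟨e', he', h⟩
          · rw [if_neg h1, if_neg h2, ih]
            constructor
            · rintro (h | ⟨e', he', h⟩)
              · exact Or.inl h
              · exact Or.inr ⟨e', Or.inr he', h⟩
            · rintro (h | ⟨e', (rfl | he'), h⟩)
              · exact Or.inl h
              · rcases h with ⟨h, _⟩ | ⟨_, h, _⟩
                · exact absurd h h1
                · exact absurd h h2
              · exact Or.inr ⟨e', he', h⟩
    rw [key]
    simp only [PySem.Set.empty, List.not_mem_nil, false_or]
    constructor
    · rintro ⟨e, he, ⟨h1, h2⟩ | ⟨h1, h2, h3⟩⟩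
      · refine ⟨hx, Or.inl ?_⟩
        rcases e with ⟨u, v⟩
        simp only at h1 h2; subst h1; subst h2; exact he
      · refine ⟨hx, Or.inr ?_⟩
        rcases e with ⟨u, v⟩
        simp only at h1 h2 h3; subst h2; subst h3; exact he
    · rintro ⟨-, h | h⟩
      · exact ⟨(x, y), h, Or.inl ⟨rfl, rfl⟩⟩
      · by_cases hyx : y = x
        · exact ⟨(y, x), h, Or.inl ⟨hyx, hyx⟩⟩
        · exact ⟨(y, x), h, Or.inr ⟨hyx, rfl, rfl⟩⟩
  · simp [hx]

-- ----- pvVisita facts -----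

theorem pvVisita_eq_none_iff {fim : Int} : ∀ {ns : List Int} {vis : PySem.Set Int} {fila : List Int},
    pvVisita fim ns vis fila = none ↔ fim ∈ ns := by
  intro ns
  induction ns with
  | nil => simp [pvVisita]
  | cons n ns ih =>
    intro vis fila
    simp only [pvVisita, List.mem_cons]
    by_cases h : n = fim
    · simp [h]
    · rw [if_neg h]
      split <;> rw [ih] <;> exact ⟨fun hh => Or.inr hh, fun hh => hh.elim (fun e => absurd e.symm h) id⟩

theorem pvVisita_some {fim : Int} : ∀ {ns : List Int} {vis vis' : PySem.Set Int} {fila fila' : List Int},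
    pvVisita fim ns vis fila = some (vis', fila') →
    (∀ y, y ∈ vis' ↔ y ∈ vis ∨ y ∈ ns) ∧
    (∀ y, y ∈ fila' ↔ y ∈ fila ∨ (y ∈ ns ∧ y ∉ vis)) ∧
    (vis.Nodup → vis'.Nodup) ∧
    (fila'.length + vis.length = fila.length + vis'.length) ∧
    (vis.length ≤ vis'.length) ∧
    (fila.Nodup → (∀ x ∈ fila, x ∈ vis) → fila'.Nodup ∧ ∀ x ∈ fila', x ∈ vis') := by
  intro ns
  induction ns with
  | nil =>
    intro vis vis' fila fila' h
    simp only [pvVisita, Option.some.injEq, Prod.mk.injEq] at h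
    obtain ⟨rfl, rfl⟩ := h
    exact ⟨by simp, by simp, fun h => h, by omega, le_rfl, fun h1 h2 => ⟨h1, h2⟩⟩
  | cons n ns ih =>
    intro vis vis' fila fila' h
    simp only [pvVisita] at h
    by_cases hf : n = fim
    · simp [hf] at h
    · rw [if_neg hf] at h
      by_cases hv : n ∈ vis
      · rw [if_pos hv] at h
        obtain ⟨m1, m2, nd, len, lemono, fq⟩ := ih h
        refine ⟨?_, ?_, nd, len, lemono, fq⟩
        · intro y; rw [m1]; constructor
          · rintro (h | h) <;> simp [h]
          · rintro (h | h)
            · exact Or.inl h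
            · rcases List.mem_cons.1 h with rfl | h
              · exact Or.inl hv
              · exact Or.inr h
        · intro y; rw [m2]; constructor
          · rintro (h | ⟨h1, h2⟩)
            · exact Or.inl h
            · exact Or.inr ⟨List.mem_cons_of_mem _ h1, h2⟩
          · rintro (h | ⟨h1, h2⟩)
            · exact Or.inl h
            · rcases List.mem_cons.1 h1 with rfl | h1
              · exact absurd hv h2
              · exact Or.inr ⟨h1, h2⟩
      · rw [if_neg hv] at h
        obtain ⟨m1, m2, nd, len, lemono, fq⟩ := ih h
        have hadd : PySem.Set.add vis n = vis ++ [n] := PySem.Set.add_of_not_mem hv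
        have hlen : (PySem.Set.add vis n).length = vis.length + 1 := by rw [hadd]; simp
        refine ⟨?_, ?_, ?_, by rw [hlen] at len; simp only [List.length_append,
          List.length_cons, List.length_nil] at len ⊢; omega,
          by rw [hlen] at lemono; omega, ?_⟩
        · intro y; rw [m1, hadd]
          simp only [List.mem_append, List.mem_cons]
          tauto
        · intro y; rw [m2, hadd]
          simp only [List.mem_append, List.mem_cons]
          by_cases hyn : y = n
          · subst hyn; tauto
          · tauto
        · intro hnd; exact nd (PySem.Set.nodup_add _ _ hnd)
        · intro h1 h2
          refine fq ?_ ?_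
          · rw [List.nodup_append]
            refine ⟨h1, List.nodup_singleton n, ?_⟩
            intro x hx b hb
            rw [List.mem_singleton] at hb
            subst hb
            exact fun hxb => hv (hxb ▸ h2 _ hx)
          · intro x hx
            rw [hadd]
            rcases List.mem_append.1 hx with hx | hx
            · exact List.mem_append.2 (Or.inl (h2 _ hx))
            · exact List.mem_append.2 (Or.inr hx)

-- ----- BFS correctness -----

theorem pvReach_closed {vertices : List Int} {arestas : List (Int × Int)} {vis : List Int}
    (hcl : ∀ x ∈ vis, ∀ y, pvStep vertices arestas x y → y ∈ vis) :
    ∀ {x z : Int}, x ∈ vis → Relation.ReflTransGen (pvStep vertices arestas) x z → z ∈ vis := by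
  intro x z hx h
  induction h with
  | refl => exact hx
  | tail hab hbc ih => exact hcl _ ih _ hbc


theorem pvBFS_spec (vertices : List Int) (arestas : List (Int × Int)) (inicio fim : Int) :
    ∀ (fuel : Nat) (vis : PySem.Set Int) (fila : List Int),
    vis.Nodup → fila.Nodup → (∀ x ∈ fila, x ∈ vis) → fim ∉ vis →
    (∀ x ∈ vis, x ∉ fila → ∀ y, pvStep vertices arestas x y → y ∈ vis) →
    (∀ x ∈ vis, x ∈ (PySem.Set.ofList (inicio :: pvEndpoints arestas) : List Int)) →
    2 * (PySem.Set.ofList (inicio :: pvEndpoints arestas)).length + fila.length + 1 ≤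
      2 * vis.length + fuel →
    (pvBFS vertices arestas fim fuel vis fila = true ↔ ∃ x ∈ vis, pvReach vertices arestas x fim) := by
  intro fuel
  induction fuel with
  | zero =>
    intro vis fila hnd _ _ _ _ hsub hfuel
    exfalso
    have : vis.length ≤ (PySem.Set.ofList (inicio :: pvEndpoints arestas)).length :=
      (List.subperm_of_subset hnd (fun x hx => hsub x hx)).length_le
    omega
  | succ fuel ih =>
    intro vis fila hnd hfnd hfv hfim hcl hsub hfuel
    obtain _ | ⟨atual, rest⟩ := fila
    · simp only [pvBFS]
      constructor
      · intro h; cases h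
      · rintro ⟨x, hx, hr⟩
        exact absurd (pvReach_closed (fun a ha y hy => hcl a ha (by simp) y hy) hx hr) hfim
    · simp only [pvBFS]
      rcases hres : pvVisita fim (listar_vizinhos vertices arestas atual) vis rest with
        _ | ⟨vis', fila'⟩
      · have hfm : fim ∈ listar_vizinhos vertices arestas atual := pvVisita_eq_none_iff.1 hres
        exact iff_of_true rfl ⟨atual, hfv atual (by simp),
          Relation.ReflTransGen.single (mem_listar_vizinhos.1 hfm)⟩
      · show pvBFS vertices arestas fim fuel vis' fila' = true ↔
          ∃ x ∈ vis, pvReach vertices arestas x fim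
        obtain ⟨m1, m2, nd, len, lemono, fq⟩ := pvVisita_some hres
        have hrestnd : rest.Nodup := (List.nodup_cons.1 hfnd).2
        have hrestv : ∀ x ∈ rest, x ∈ vis := fun x hx => hfv x (List.mem_cons_of_mem _ hx)
        obtain ⟨hfnd', hfv'⟩ := fq hrestnd hrestv
        have hnofim : fim ∉ listar_vizinhos vertices arestas atual := by
          intro h
          rw [← pvVisita_eq_none_iff (vis := vis) (fila := rest)] at h
          rw [hres] at h; cases h
        have hfim' : fim ∉ vis' := by
          intro h; rcases (m1 fim).1 h with h | h; exacts [hfim h, hnofim h]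
        have hcl' : ∀ x ∈ vis', x ∉ fila' → ∀ y, pvStep vertices arestas x y → y ∈ vis' := by
          intro x hx hxf y hy
          by_cases hxa : x = atual
          · subst hxa
            exact (m1 y).2 (Or.inr (mem_listar_vizinhos.2 hy))
          · by_cases hxv : x ∈ vis
            · have hxrest : x ∉ rest := fun h => hxf ((m2 x).2 (Or.inl h))
              have : y ∈ vis := hcl x hxv (by
                simp only [List.mem_cons, not_or]; exact ⟨hxa, hxrest⟩) y hy
              exact (m1 y).2 (Or.inl this)
            · rcases (m1 x).1 hx with h | h
              · exact absurd h hxv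
              · exact absurd ((m2 x).2 (Or.inr ⟨h, hxv⟩)) hxf
        have hsub' : ∀ x ∈ vis', x ∈ (PySem.Set.ofList (inicio :: pvEndpoints arestas) : List Int) := by
          intro x hx
          rcases (m1 x).1 hx with h | h
          · exact hsub x h
          · rw [PySem.Set.mem_ofList, List.mem_cons]
            exact Or.inr (pvStep_snd_mem_endpoints (mem_listar_vizinhos.1 h))
        have hfuel' : 2 * (PySem.Set.ofList (inicio :: pvEndpoints arestas)).length +
            fila'.length + 1 ≤ 2 * vis'.length + fuel := by
          simp only [List.length_cons] at hfuel
          omega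
        rw [ih vis' fila' (nd hnd) hfnd' hfv' hfim' hcl' hsub' hfuel']
        constructor
        · rintro ⟨x, hx, hr⟩
          rcases (m1 x).1 hx with h | h
          · exact ⟨x, h, hr⟩
          · exact ⟨atual, hfv atual (by simp),
              Relation.ReflTransGen.head (mem_listar_vizinhos.1 h) hr⟩
        · rintro ⟨x, hx, hr⟩
          exact ⟨x, (m1 x).2 (Or.inl hx), hr⟩

-- ----- relaxation facts -----

theorem pvRelax_fst_mono {vset : PySem.Set Int} {st : PySem.Set Int × Bool} {e : Int × Int} {y : Int}
    (h : y ∈ st.1) : y ∈ (pvRelax vset st e).1 := by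
  simp only [pvRelax]
  split_ifs <;> simp_all [PySem.Set.mem_add]

theorem pvRelax_snd_true {vset : PySem.Set Int} {st : PySem.Set Int × Bool} {e : Int × Int}
    (h : st.2 = true) : (pvRelax vset st e).2 = true := by
  simp only [pvRelax]
  split_ifs <;> simp_all

-- one relaxation either leaves the state unchanged or sets the flag and grows the set
theorem pvRelax_cases (vset : PySem.Set Int) (alc : PySem.Set Int) (b : Bool) (e : Int × Int) :
    pvRelax vset (alc, b) e = (alc, b) ∨
    ((pvRelax vset (alc, b) e).2 = true ∧ alc.length + 1 ≤ (pvRelax vset (alc, b) e).1.length) := by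
  simp only [pvRelax]
  split_ifs with hc1 hc2 hc3
  · right
    refine ⟨rfl, ?_⟩
    show alc.length + 1 ≤ (PySem.Set.add (PySem.Set.add alc e.2) e.1).length
    have l1 : (PySem.Set.add alc e.2).length = alc.length + 1 := by
      rw [PySem.Set.add_of_not_mem hc1.2.2]; simp
    have l2 : (PySem.Set.add alc e.2).length ≤ (PySem.Set.add (PySem.Set.add alc e.2) e.1).length := by
      rw [PySem.Set.add_eq_ite (PySem.Set.add alc e.2) e.1]
      split
      · exact le_rfl
      · simp
    omega
  · right
    refine ⟨rfl, ?_⟩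
    show alc.length + 1 ≤ (PySem.Set.add alc e.2).length
    rw [PySem.Set.add_of_not_mem hc1.2.2]; simp
  · right
    refine ⟨rfl, ?_⟩
    show alc.length + 1 ≤ (PySem.Set.add alc e.1).length
    rw [PySem.Set.add_of_not_mem hc3.2.2]; simp
  · left; rfl

theorem pvFold_fst_mono (vset : PySem.Set Int) : ∀ (l : List (Int × Int)) (st : PySem.Set Int × Bool)
    (y : Int), y ∈ st.1 → y ∈ (l.foldl (pvRelax vset) st).1 := by
  intro l
  induction l with
  | nil => intro st y h; exact h
  | cons e l ih =>
    intro st y h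
    simp only [List.foldl_cons]
    exact ih (pvRelax vset st e) y (pvRelax_fst_mono h)

theorem pvFold_snd_true (vset : PySem.Set Int) : ∀ (l : List (Int × Int)) (st : PySem.Set Int × Bool),
    st.2 = true → (l.foldl (pvRelax vset) st).2 = true := by
  intro l
  induction l with
  | nil => intro st h; exact h
  | cons e l ih =>
    intro st h
    simp only [List.foldl_cons]
    exact ih (pvRelax vset st e) (pvRelax_snd_true h)

theorem pvFold_length_mono (vset : PySem.Set Int) : ∀ (l : List (Int × Int))
    (st : PySem.Set Int × Bool), st.1.length ≤ (l.foldl (pvRelax vset) st).1.length := by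
  intro l
  induction l with
  | nil => intro st; exact le_rfl
  | cons e l ih =>
    intro st
    simp only [List.foldl_cons]
    refine le_trans ?_ (ih (pvRelax vset st e))
    rcases pvRelax_cases vset st.1 st.2 e with h | ⟨-, h⟩
    · rw [show (st.1, st.2) = st from rfl] at h
      rw [h]
    · rw [show (st.1, st.2) = st from rfl] at h
      omega

theorem pvFold_flag_false (vset : PySem.Set Int) : ∀ (l : List (Int × Int)) (alc : PySem.Set Int),
    (l.foldl (pvRelax vset) (alc, false)).2 = false →
    (l.foldl (pvRelax vset) (alc, false)).1 = alc := by
  intro l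
  induction l with
  | nil => intro alc _; rfl
  | cons e l ih =>
    intro alc h
    simp only [List.foldl_cons] at h ⊢
    rcases pvRelax_cases vset alc false e with heq | ⟨ht, -⟩
    · rw [heq] at h ⊢; exact ih alc h
    · exfalso
      rw [pvFold_snd_true vset l _ ht] at h
      cases h

theorem pvFold_flag_grow (vset : PySem.Set Int) : ∀ (l : List (Int × Int)) (alc : PySem.Set Int),
    (l.foldl (pvRelax vset) (alc, false)).2 = true →
    alc.length + 1 ≤ (l.foldl (pvRelax vset) (alc, false)).1.length := by
  intro l
  induction l with
  | nil => intro alc h; cases h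
  | cons e l ih =>
    intro alc h
    simp only [List.foldl_cons] at h ⊢
    rcases pvRelax_cases vset alc false e with heq | ⟨-, hlen⟩
    · rw [heq] at h ⊢; exact ih alc h
    · have := pvFold_length_mono vset l (pvRelax vset (alc, false) e)
      omega

theorem pvRelax_sound {vertices : List Int} {arestas : List (Int × Int)} {inicio : Int}
    {st : PySem.Set Int × Bool} {e : Int × Int}
    (he : e ∈ arestas) (hs : ∀ y ∈ st.1, pvReach vertices arestas inicio y) :
    ∀ y ∈ (pvRelax (PySem.Set.ofList vertices) st e).1, pvReach vertices arestas inicio y := by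
  intro y hy
  simp only [pvRelax] at hy
  split_ifs at hy with hc1 hc2 hc3
  · have hr2 : pvReach vertices arestas inicio e.2 :=
      Relation.ReflTransGen.tail (hs _ hc1.1) ⟨(PySem.Set.mem_ofList _ _).1 hc1.2.1, Or.inl he⟩
    rcases (PySem.Set.mem_add _ _ _).1 hy with hy | rfl
    · rcases (PySem.Set.mem_add _ _ _).1 hy with hy | rfl
      · exact hs y hy
      · exact hr2
    · exact Relation.ReflTransGen.tail hr2 ⟨(PySem.Set.mem_ofList _ _).1 hc2.2.1, Or.inr he⟩
  · rcases (PySem.Set.mem_add _ _ _).1 hy with hy | rfl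
    · exact hs y hy
    · exact Relation.ReflTransGen.tail (hs _ hc1.1)
        ⟨(PySem.Set.mem_ofList _ _).1 hc1.2.1, Or.inl he⟩
  · rcases (PySem.Set.mem_add _ _ _).1 hy with hy | rfl
    · exact hs y hy
    · exact Relation.ReflTransGen.tail (hs _ hc3.1)
        ⟨(PySem.Set.mem_ofList _ _).1 hc3.2.1, Or.inr he⟩
  · exact hs y hy

theorem pvFold_sound {vertices : List Int} {arestas : List (Int × Int)} {inicio : Int} :
    ∀ (l : List (Int × Int)), (∀ e ∈ l, e ∈ arestas) →
    ∀ (st : PySem.Set Int × Bool), (∀ y ∈ st.1, pvReach vertices arestas inicio y) →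
    ∀ y ∈ (l.foldl (pvRelax (PySem.Set.ofList vertices)) st).1,
      pvReach vertices arestas inicio y := by
  intro l
  induction l with
  | nil => intro _ st hs y hy; exact hs y hy
  | cons e l ih =>
    intro hl st hs
    simp only [List.foldl_cons]
    exact ih (fun e' he' => hl e' (List.mem_cons_of_mem _ he'))
      (pvRelax (PySem.Set.ofList vertices) st e)
      (pvRelax_sound (hl e (by simp)) hs)

theorem pvFold_complete (vertices : List Int) (arestas : List (Int × Int)) :
    ∀ (l : List (Int × Int)) (st : PySem.Set Int × Bool) (x y : Int),
    ((x, y) ∈ l ∨ (y, x) ∈ l) → x ∈ vertices → x ∈ st.1 →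
    y ∈ (l.foldl (pvRelax (PySem.Set.ofList vertices)) st).1 := by
  intro l
  induction l with
  | nil => intro st x y h; simp at h
  | cons e l ih =>
    intro st x y hmem hxv hxa
    simp only [List.foldl_cons]
    have hxa1 : x ∈ (pvRelax (PySem.Set.ofList vertices) st e).1 := pvRelax_fst_mono hxa
    rcases hmem with h | h
    · rcases List.mem_cons.1 h with h | h
      · -- e = (x, y): after relaxing e, y is in the set
        refine pvFold_fst_mono _ l _ y ?_
        subst h
        simp only [pvRelax]
        split_ifs <;> simp_all [PySem.Set.mem_add, PySem.Set.mem_ofList]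
      · exact ih _ x y (Or.inl h) hxv hxa1
    · rcases List.mem_cons.1 h with h | h
      · -- e = (y, x): after relaxing e, y is in the set
        refine pvFold_fst_mono _ l _ y ?_
        subst h
        simp only [pvRelax]
        split_ifs <;> simp_all [PySem.Set.mem_add, PySem.Set.mem_ofList]
      · exact ih _ x y (Or.inr h) hxv hxa1

theorem pvRelax_nodup_sub {U : List Int} {vset : PySem.Set Int} {st : PySem.Set Int × Bool}
    {e : Int × Int} (h1 : e.1 ∈ U) (h2 : e.2 ∈ U) (hnd : st.1.Nodup)
    (hsub : ∀ y ∈ st.1, y ∈ U) :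
    (pvRelax vset st e).1.Nodup ∧ ∀ y ∈ (pvRelax vset st e).1, y ∈ U := by
  simp only [pvRelax]
  split_ifs with hc1 hc2 hc3
  · refine ⟨PySem.Set.nodup_add _ _ (PySem.Set.nodup_add _ _ hnd), ?_⟩
    intro y hy
    rcases (PySem.Set.mem_add _ _ _).1 hy with hy | rfl
    · rcases (PySem.Set.mem_add _ _ _).1 hy with hy | rfl
      exacts [hsub y hy, h2]
    · exact h1
  · refine ⟨PySem.Set.nodup_add _ _ hnd, ?_⟩
    intro y hy
    rcases (PySem.Set.mem_add _ _ _).1 hy with hy | rfl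
    exacts [hsub y hy, h2]
  · refine ⟨PySem.Set.nodup_add _ _ hnd, ?_⟩
    intro y hy
    rcases (PySem.Set.mem_add _ _ _).1 hy with hy | rfl
    exacts [hsub y hy, h1]
  · exact ⟨hnd, hsub⟩

theorem pvFold_nodup_sub {U : List Int} (vset : PySem.Set Int) :
    ∀ (l : List (Int × Int)), (∀ e ∈ l, e.1 ∈ U ∧ e.2 ∈ U) →
    ∀ (st : PySem.Set Int × Bool), st.1.Nodup → (∀ y ∈ st.1, y ∈ U) →
    (l.foldl (pvRelax vset) st).1.Nodup ∧ ∀ y ∈ (l.foldl (pvRelax vset) st).1, y ∈ U := by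
  intro l
  induction l with
  | nil => intro _ st hnd hsub; exact ⟨hnd, hsub⟩
  | cons e l ih =>
    intro hl st hnd hsub
    simp only [List.foldl_cons]
    obtain ⟨hnd1, hsub1⟩ := pvRelax_nodup_sub (hl e (by simp)).1 (hl e (by simp)).2 hnd hsub
      (vset := vset)
    exact ih (fun e' he' => hl e' (List.mem_cons_of_mem _ he')) _ hnd1 hsub1

-- ----- saturation correctness -----

theorem pvSatura_spec (vertices : List Int) (arestas : List (Int × Int)) (inicio : Int) :
    ∀ (fuel : Nat) (alc : PySem.Set Int), alc.Nodup →
    (∀ y ∈ alc, y ∈ (inicio :: pvEndpoints arestas : List Int)) →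
    (∀ y ∈ alc, pvReach vertices arestas inicio y) →
    (PySem.Set.ofList (inicio :: pvEndpoints arestas)).length + 1 ≤ alc.length + fuel →
    (∀ y ∈ alc, y ∈ pvSatura arestas (PySem.Set.ofList vertices) fuel alc) ∧
    (∀ y ∈ pvSatura arestas (PySem.Set.ofList vertices) fuel alc,
      pvReach vertices arestas inicio y) ∧
    (∀ x y, x ∈ pvSatura arestas (PySem.Set.ofList vertices) fuel alc →
      pvStep vertices arestas x y →
      y ∈ pvSatura arestas (PySem.Set.ofList vertices) fuel alc) := by
  intro fuel
  induction fuel with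
  | zero =>
    intro alc hnd hsub _ hfuel
    exfalso
    have h1 : ∀ y ∈ alc, y ∈ (PySem.Set.ofList (inicio :: pvEndpoints arestas) : List Int) :=
      fun y hy => (PySem.Set.mem_ofList _ _).2 (hsub y hy)
    have : alc.length ≤ (PySem.Set.ofList (inicio :: pvEndpoints arestas)).length :=
      (List.subperm_of_subset hnd (fun x hx => h1 x hx)).length_le
    omega
  | succ fuel ih =>
    intro alc hnd hsub hreach hfuel
    simp only [pvSatura]
    rcases hflag : (arestas.foldl (pvRelax (PySem.Set.ofList vertices)) (alc, false)).2 with _ | _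
    · simp only [Bool.false_eq_true, if_false]
      have hfix := pvFold_flag_false (PySem.Set.ofList vertices) arestas alc hflag
      rw [hfix]
      refine ⟨fun y hy => hy, hreach, ?_⟩
      intro x y hx hstep
      have := pvFold_complete vertices arestas arestas (alc, false) x y hstep.2 hstep.1 hx
      rw [hfix] at this
      exact this
    · simp only [if_pos rfl]
      have hends : ∀ e ∈ arestas, e.1 ∈ (inicio :: pvEndpoints arestas : List Int) ∧
          e.2 ∈ (inicio :: pvEndpoints arestas : List Int) := by
        intro e he
        constructor <;> exact List.mem_cons_of_mem _ (List.mem_flatMap.2 ⟨e, he, by simp⟩)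
      obtain ⟨hnd1, hsub1⟩ := pvFold_nodup_sub (PySem.Set.ofList vertices) arestas hends
        (alc, false) hnd hsub
      have hreach1 := pvFold_sound (arestas := arestas) (inicio := inicio)
        arestas (fun _ he => he) (alc, false) hreach (vertices := vertices)
      have hgrow := pvFold_flag_grow (PySem.Set.ofList vertices) arestas alc hflag
      obtain ⟨ha, hb, hc⟩ := ih _ hnd1 hsub1 hreach1 (by omega)
      refine ⟨?_, hb, hc⟩
      intro y hy
      exact ha y (pvFold_fst_mono (PySem.Set.ofList vertices) arestas (alc, false) y hy)

-- B's whole saturation computes exactly the set of reachable values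
theorem pvSatura_reach (vertices : List Int) (arestas : List (Int × Int)) (inicio : Int)
    (hino : inicio ∈ vertices) (y : Int) :
    y ∈ pvSatura arestas (PySem.Set.ofList vertices)
        ((inicio :: pvEndpoints arestas).length + 1) (PySem.Set.add PySem.Set.empty inicio) ↔
      pvReach vertices arestas inicio y := by
  have halc0 : (PySem.Set.add PySem.Set.empty inicio : List Int) = [inicio] := rfl
  obtain ⟨ha, hb, hc⟩ := pvSatura_spec vertices arestas inicio
    ((inicio :: pvEndpoints arestas).length + 1) (PySem.Set.add PySem.Set.empty inicio)
    (by rw [halc0]; simp)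
    (by rw [halc0]; intro y hy; simp only [List.mem_singleton] at hy; subst hy; simp)
    (by rw [halc0]; intro y hy; simp only [List.mem_singleton] at hy; subst hy;
        exact Relation.ReflTransGen.refl)
    (by
      have := PySem.Set.length_ofList_le (inicio :: pvEndpoints arestas)
      rw [halc0]
      simp only [List.length_singleton]
      omega)
  constructor
  · exact hb y
  · intro hr
    exact pvReach_closed (fun a haa yy hyy => hc a yy haa hyy) (ha inicio (by rw [halc0]; simp)) hr

-- ===== VERDICT (by name: the statement is the Claim_ definition above) =====
theorem percurso_possivel_spec : Claim_equal_percurso_possivel := by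
  intro vertices arestas inicio fim _
  unfold Spec_percurso_possivel
  simp only [percurso_possivel, percurso_possivel_alt]
  by_cases hio : inicio ∈ vertices
  · by_cases hfo : fim ∈ vertices
    · rw [if_neg (show ¬(inicio ∉ vertices ∨ fim ∉ vertices) from by simp [hio, hfo]),
        if_neg (show ¬(inicio ∉ (PySem.Set.ofList vertices : List Int) ∨
          fim ∉ (PySem.Set.ofList vertices : List Int)) from by
            simp [PySem.Set.mem_ofList, hio, hfo])]
      by_cases heq : inicio = fim
      · rw [if_pos heq]
        have hmem : fim ∈ pvSatura arestas (PySem.Set.ofList vertices)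
            ((inicio :: pvEndpoints arestas).length + 1) (PySem.Set.add PySem.Set.empty inicio) := by
          rw [pvSatura_reach vertices arestas inicio hio fim, heq]
          exact Relation.ReflTransGen.refl
        exact (decide_eq_true hmem).symm
      · rw [if_neg heq]
        have hA := pvBFS_spec vertices arestas inicio fim
          (2 * (inicio :: pvEndpoints arestas).length + 2)
          (PySem.Set.add PySem.Set.empty inicio) [inicio]
          (by simp [show (PySem.Set.add PySem.Set.empty inicio : List Int) = [inicio] from rfl])
          (by simp)
          (by
            intro x hx
            rw [show (PySem.Set.add PySem.Set.empty inicio : List Int) = [inicio] from rfl]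
            exact hx)
          (by
            rw [show (PySem.Set.add PySem.Set.empty inicio : List Int) = [inicio] from rfl]
            simp only [List.mem_singleton]
            intro h; exact heq h.symm)
          (by
            intro x hx hxf y _
            exfalso
            rw [show (PySem.Set.add PySem.Set.empty inicio : List Int) = [inicio] from rfl] at hx
            exact hxf hx)
          (by
            rw [show (PySem.Set.add PySem.Set.empty inicio : List Int) = [inicio] from rfl]
            intro x hx
            rw [List.mem_singleton] at hx
            subst hx
            exact (PySem.Set.mem_ofList _ _).2 (by simp))
          (by
            have := PySem.Set.length_ofList_le (inicio :: pvEndpoints arestas)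
            rw [show (PySem.Set.add PySem.Set.empty inicio : List Int) = [inicio] from rfl]
            simp only [List.length_cons]
            simp only [List.length_cons] at this
            omega)
        have hB := pvSatura_reach vertices arestas inicio hio fim
        have hiff : (pvBFS vertices arestas fim (2 * (inicio :: pvEndpoints arestas).length + 2)
            (PySem.Set.add PySem.Set.empty inicio) [inicio] = true) ↔
            (decide (fim ∈ pvSatura arestas (PySem.Set.ofList vertices)
              ((inicio :: pvEndpoints arestas).length + 1)
              (PySem.Set.add PySem.Set.empty inicio)) = true) := by
          rw [hA, decide_eq_true_eq, hB]
          constructor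
          · rintro ⟨x, hx, hr⟩
            rw [show (PySem.Set.add PySem.Set.empty inicio : List Int) = [inicio] from rfl] at hx
            rw [List.mem_singleton] at hx
            subst hx
            exact hr
          · intro hr
            refine ⟨inicio, ?_, hr⟩
            rw [show (PySem.Set.add PySem.Set.empty inicio : List Int) = [inicio] from rfl]
            simp
        rcases hx : pvBFS vertices arestas fim (2 * (inicio :: pvEndpoints arestas).length + 2)
            (PySem.Set.add PySem.Set.empty inicio) [inicio] with _ | _
        · rcases hy : (decide (fim ∈ pvSatura arestas (PySem.Set.ofList vertices)
              ((inicio :: pvEndpoints arestas).length + 1)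
              (PySem.Set.add PySem.Set.empty inicio))) with _ | _
          · rfl
          · exact absurd (hiff.2 (by rw [hy])) (by rw [hx]; exact Bool.false_ne_true)
        · rcases hy : (decide (fim ∈ pvSatura arestas (PySem.Set.ofList vertices)
              ((inicio :: pvEndpoints arestas).length + 1)
              (PySem.Set.add PySem.Set.empty inicio))) with _ | _
          · exact absurd (hiff.1 (by rw [hx])) (by rw [hy]; exact Bool.false_ne_true)
          · rfl
    · rw [if_pos (Or.inr hfo),
        if_pos (Or.inr (fun h => hfo ((PySem.Set.mem_ofList _ _).1 h)))]
  · rw [if_pos (Or.inl hio),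
        if_pos (Or.inl (fun h => hio ((PySem.Set.mem_ofList _ _).1 h)))]
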